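-- pv_equiv track=rewrite | github.com/therealityreport/screenalytics | apps/workspace-ui/episode_detail_layout.py | normalize_stage_key
-- ===== SOURCE A (Python) =====
-- _STAGE_KEY_ALIASES: dict[str, str] = {
--     "detect": "detect",
--     "detect/track": "detect",
--     "detect track": "detect",
--     "detect_track": "detect",
--     "faces": "faces",
--     "faces harvest": "faces",
--     "faces_embed": "faces",
--     "face harvest": "faces",
--     "cluster": "cluster",
--     "clustering": "cluster",
--     "body tracking": "body_tracking",
--     "body_tracking": "body_tracking",
--     "body tracking fusion": "track_fusion",
--     "body_tracking_fusion": "track_fusion",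
--     "track fusion": "track_fusion",
--     "track_fusion": "track_fusion",
--     "pdf": "pdf",
--     "pdf export": "pdf",
--     "export pdf": "pdf",
-- }
--
-- def normalize_stage_key(raw: str | None) -> str | None:
--     if not raw:
--         return None
--     label = raw.strip().lower()
--     for delim in ("(", ":", "-", "|"):
--         if delim in label:
--             label = label.split(delim, 1)[0].strip()
--     label = label.replace("_", " ")
--     label = " ".join(label.split())
--     return _STAGE_KEY_ALIASES.get(label)
-- ===== SOURCE B (Python) =====
-- _STAGE_KEY_ALIASES: dict[str, str] = {
--     "detect": "detect",
--     "detect/track": "detect",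
--     "detect track": "detect",
--     "detect_track": "detect",
--     "faces": "faces",
--     "faces harvest": "faces",
--     "faces_embed": "faces",
--     "face harvest": "faces",
--     "cluster": "cluster",
--     "clustering": "cluster",
--     "body tracking": "body_tracking",
--     "body_tracking": "body_tracking",
--     "body tracking fusion": "track_fusion",
--     "body_tracking_fusion": "track_fusion",
--     "track fusion": "track_fusion",
--     "track_fusion": "track_fusion",
--     "pdf": "pdf",
--     "pdf export": "pdf",
--     "export pdf": "pdf",
-- }
--
--
-- def normalize_stage_key(raw: str | None) -> str | None:
--     # One-pass tokenizer: scan the cleaned label once, stopping at the first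
--     # delimiter and splitting words on whitespace/underscore as we go,
--     # instead of A's repeated split/strip/replace/join passes.
--     if not raw:
--         return None
--     words, cur = [], []
--     for ch in raw.strip().lower():
--         if ch in "(:-|":
--             break
--         if ch == "_" or ch.isspace():
--             if cur:
--                 words.append("".join(cur))
--                 cur = []
--         else:
--             cur.append(ch)
--     if cur:
--         words.append("".join(cur))
--     return _STAGE_KEY_ALIASES.get(" ".join(words))
-- ===== Notes on version B (the rewrite author's own statement) =====
-- stated objective: alternative
-- what changed: Replaces A's multi-pass pipeline (a per-delimiter split-and-strip loop followed by an underscore replacement, a whitespace split and a join) with a single left-to-right tokenizer that stops at the first delimiter character and collects words at separator boundaries in one pass.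
import Mathlib
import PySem

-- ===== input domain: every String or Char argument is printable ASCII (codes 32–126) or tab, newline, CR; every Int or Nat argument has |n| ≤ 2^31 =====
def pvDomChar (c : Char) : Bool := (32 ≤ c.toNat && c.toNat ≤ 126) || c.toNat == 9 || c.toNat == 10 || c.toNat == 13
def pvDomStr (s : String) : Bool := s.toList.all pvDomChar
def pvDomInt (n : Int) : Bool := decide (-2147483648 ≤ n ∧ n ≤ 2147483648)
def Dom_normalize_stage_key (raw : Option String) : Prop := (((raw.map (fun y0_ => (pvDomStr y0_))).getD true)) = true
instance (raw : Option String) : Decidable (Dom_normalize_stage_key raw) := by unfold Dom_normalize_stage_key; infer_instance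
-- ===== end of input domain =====

-- B replaces A's multi-pass pipeline (per-delimiter split+strip loop, replace, split, join)
-- by a single left-to-right tokenizer pass; same return value, objective: alternative.

-- shared module-level constant _STAGE_KEY_ALIASES (a dict literal with distinct keys)
def stageAliases : PySem.Dict String String :=
  ⟨[("detect", "detect"), ("detect/track", "detect"), ("detect track", "detect"),
    ("detect_track", "detect"), ("faces", "faces"), ("faces harvest", "faces"),
    ("faces_embed", "faces"), ("face harvest", "faces"), ("cluster", "cluster"),
    ("clustering", "cluster"), ("body tracking", "body_tracking"),
    ("body_tracking", "body_tracking"), ("body tracking fusion", "track_fusion"),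
    ("body_tracking_fusion", "track_fusion"), ("track fusion", "track_fusion"),
    ("track_fusion", "track_fusion"), ("pdf", "pdf"), ("pdf export", "pdf"),
    ("export pdf", "pdf")]⟩

-- the delimiter characters "(:-|"
def stageDelims : List Char := ['(', ':', '-', '|']

-- ===== PORT A =====

-- one iteration of A's loop body: label.split(delim, 1)[0].strip() when delim in label
def aStep (label : List Char) (d : List Char) : List Char :=
  if PySem.Chars.isIn d label then
    PySem.Chars.strip (((PySem.Chars.splitMax? label d 1).getD []).headD [])
  else label

def normalize_stage_key (raw : Option String) : Option String :=
  match raw with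
  | none => none
  | some s =>
    if s = "" then none
    else
      let label0 := PySem.Chars.lower (PySem.Chars.strip s.toList)
      let label1 := [['('], [':'], ['-'], ['|']].foldl aStep label0
      let label2 := PySem.Chars.replace label1 ['_'] [' ']
      let label3 := PySem.Chars.join [' '] (PySem.Chars.split₀ label2)
      PySem.Dict.get? stageAliases (String.mk label3)

-- ===== PORT B =====

-- B's single pass: break at the first delimiter, flush the current word at '_'/whitespace
def bGo : List Char → List Char → List (List Char) → List (List Char)
  | [], cur, acc => if cur = [] then acc.reverse else (cur.reverse :: acc).reverse
  | c :: rest, cur, acc =>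
    if PySem.Chars.isIn [c] stageDelims then
      (if cur = [] then acc.reverse else (cur.reverse :: acc).reverse)
    else if (c == '_' || PySem.Chars.isspace c) then
      bGo rest [] (if cur = [] then acc else cur.reverse :: acc)
    else
      bGo rest (c :: cur) acc

def normalize_stage_key_alt (raw : Option String) : Option String :=
  match raw with
  | none => none
  | some s =>
    if s = "" then none
    else
      let words := bGo (PySem.Chars.lower (PySem.Chars.strip s.toList)) [] []
      PySem.Dict.get? stageAliases (String.mk (PySem.Chars.join [' '] words))

-- ===== PRECONDITION & SPEC =====
def Spec_normalize_stage_key (raw : Option String) (out : Option String) : Prop := out = normalize_stage_key_alt raw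
instance (raw : Option String) (out : Option String) : Decidable (Spec_normalize_stage_key raw out) := by unfold Spec_normalize_stage_key; infer_instance

-- ===== CLAIM (what is proved, stated in full; the proofs are below) =====
def Claim_equal_normalize_stage_key : Prop := ∀ (raw : Option String), Dom_normalize_stage_key raw → Spec_normalize_stage_key raw (normalize_stage_key raw)

-- ===== LEMMAS AND PROOFS =====

-- tokenizer without the delimiter branch: the common normal form of both pipelines
def tok : List Char → List Char → List (List Char) → List (List Char)
  | [], cur, acc => if cur = [] then acc.reverse else (cur.reverse :: acc).reverse
  | c :: rest, cur, acc =>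
    if (c == '_' || PySem.Chars.isspace c) then
      tok rest [] (if cur = [] then acc else cur.reverse :: acc)
    else
      tok rest (c :: cur) acc

-- "not a delimiter" predicate and the key of a string: tokens of its pre-delimiter prefix
def Pb (c : Char) : Bool := !(PySem.Chars.isIn [c] stageDelims)

def key (t : List Char) : List (List Char) := tok (t.takeWhile Pb) [] []

theorem isIn_singleton_delims (c : Char) :
    PySem.Chars.isIn [c] stageDelims = true ↔ c ∈ stageDelims := by
  rw [PySem.Chars.isIn_iff_infix]
  exact List.singleton_infix_iff c stageDelims

theorem ws_sep {c : Char} (h : PySem.Chars.isspace c = true) :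
    (c == '_' || PySem.Chars.isspace c) = true := by simp [h]

theorem ws_not_delim {c : Char} (h : PySem.Chars.isspace c = true) :
    Pb c = true := by
  unfold Pb
  cases hin : PySem.Chars.isIn [c] stageDelims
  · rfl
  · exfalso
    have := (isIn_singleton_delims c).mp hin
    simp [stageDelims] at this
    rcases this with h' | h' | h' | h' <;> subst h' <;> simp [PySem.Chars.isspace] at h

theorem go_acc (c : Char) : ∀ (fuel m : ℕ) (l cur : List Char) (acc : List (List Char)) (a : List Char),
    (PySem.Chars.splitOnMax.go [c] fuel m l cur (acc ++ [a])).headD [] = a := by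
  intro fuel
  induction fuel with
  | zero =>
    intro m l cur acc a
    simp [PySem.Chars.splitOnMax.go]
  | succ f ih =>
    intro m l cur acc a
    match l with
    | [] => simp [PySem.Chars.splitOnMax.go]
    | x :: rest =>
      simp only [PySem.Chars.splitOnMax.go]
      by_cases hm : m = 0
      · simp [hm]
      · simp only [hm, if_false]
        by_cases hp : [c].isPrefixOf (x :: rest) = true
        · simp only [hp, if_true]
          have : cur.reverse :: (acc ++ [a]) = (cur.reverse :: acc) ++ [a] := by simp
          rw [this, ih]
        · simp only [hp]
          simp only [Bool.not_eq_true] at hp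
          rw [if_neg (by simp [hp]), ih]

theorem go_head (c : Char) : ∀ (l : List Char) (fuel : ℕ) (cur : List Char),
    l.length ≤ fuel →
    (PySem.Chars.splitOnMax.go [c] fuel 1 l cur []).headD []
      = cur.reverse ++ l.takeWhile (fun x => !(c == x)) := by
  intro l
  induction l with
  | nil =>
    intro fuel cur _
    match fuel with
    | 0 => simp [PySem.Chars.splitOnMax.go]
    | f + 1 => simp [PySem.Chars.splitOnMax.go]
  | cons x rest ih =>
    intro fuel cur hfuel
    match fuel with
    | 0 => simp at hfuel
    | f + 1 =>
      simp only [PySem.Chars.splitOnMax.go]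
      rw [if_neg (by norm_num)]
      by_cases hp : (c == x) = true
      · have hpre : [c].isPrefixOf (x :: rest) = true := by simp [List.isPrefixOf, hp]
        simp only [hpre, if_true]
        have : ([List.reverse cur] : List (List Char)) = [] ++ [cur.reverse] := by simp
        simp only [List.length_cons, List.drop_succ_cons, List.drop_zero]
        rw [this, go_acc, List.takeWhile_cons, hp]
        simp
      · have hpre : [c].isPrefixOf (x :: rest) = false := by
          simp [List.isPrefixOf]
          simpa using hp
        simp only [hpre, Bool.false_eq_true, if_false]
        rw [ih f (x :: cur) (by simpa using Nat.le_of_succ_le_succ hfuel)]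
        rw [List.takeWhile_cons, if_pos (by simp [hp])]
        simp

theorem splitfirst (c : Char) (label : List Char) :
    ((PySem.Chars.splitMax? label [c] 1).getD []).headD []
      = label.takeWhile (fun x => !(c == x)) := by
  have h := go_head c label (label.length + 1) [] (by omega)
  simpa [PySem.Chars.splitMax?, PySem.Chars.splitOnMax] using h

theorem aStep_eq (t : List Char) (c : Char) :
    aStep t [c] = if PySem.Chars.isIn [c] t then
        PySem.Chars.strip (t.takeWhile (fun x => !(c == x)))
      else t := by
  unfold aStep
  rw [splitfirst]

theorem tok_sep_all : ∀ (w : List Char), (∀ c ∈ w, (c == '_' || PySem.Chars.isspace c) = true) →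
    ∀ (cur : List Char) (acc : List (List Char)), tok w cur acc = tok [] cur acc := by
  intro w
  induction w with
  | nil => intro _ _ _; rfl
  | cons c w' ih =>
    intro h cur acc
    simp only [tok, h c (by simp), if_true]
    rw [ih (fun x hx => h x (by simp [hx])) [] _]
    by_cases hc : cur = [] <;> simp [tok, hc]

theorem tok_append_sep : ∀ (x w : List Char), (∀ c ∈ w, (c == '_' || PySem.Chars.isspace c) = true) →
    ∀ (cur : List Char) (acc : List (List Char)), tok (x ++ w) cur acc = tok x cur acc := by
  intro x
  induction x with
  | nil => intro w h cur acc; simpa using tok_sep_all w h cur acc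
  | cons c x' ih =>
    intro w h cur acc
    simp only [List.cons_append, tok]
    by_cases hc : (c == '_' || PySem.Chars.isspace c) = true
    · simp only [hc, if_true]; rw [ih w h]
    · simp only [hc, Bool.false_eq_true, if_false]; rw [ih w h]

theorem tok_prefix_sep : ∀ (w : List Char), (∀ c ∈ w, (c == '_' || PySem.Chars.isspace c) = true) →
    ∀ (x : List Char) (acc : List (List Char)), tok (w ++ x) [] acc = tok x [] acc := by
  intro w
  induction w with
  | nil => intro _ x acc; rfl
  | cons c w' ih =>
    intro h x acc
    simp only [List.cons_append, tok, h c (by simp), if_true]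
    exact ih (fun y hy => h y (by simp [hy])) x acc

theorem take_drop_split (P Q : Char → Bool) (h : ∀ c, Q c = true → P c = true) :
    ∀ (l : List Char), l.takeWhile P = l.takeWhile Q ++ (l.dropWhile Q).takeWhile P := by
  intro l
  induction l with
  | nil => rfl
  | cons x rest ih =>
    by_cases hQ : Q x = true
    · simp only [List.takeWhile_cons, List.dropWhile_cons, hQ, h x hQ, if_true]
      rw [ih]
      simp
    · simp [List.takeWhile_cons, List.dropWhile_cons, hQ]

theorem key_lstrip (u : List Char) :
    key (List.dropWhile PySem.Chars.isspace u) = key u := by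
  unfold key
  conv_rhs => rw [take_drop_split Pb PySem.Chars.isspace (fun c hc => ws_not_delim hc) u]
  rw [tok_prefix_sep _ (fun c hc => ws_sep (List.mem_takeWhile_imp hc))]

theorem key_rstrip (v : List Char) : key (PySem.Chars.rstrip v) = key v := by
  have hv : v = PySem.Chars.rstrip v ++ (v.reverse.takeWhile PySem.Chars.isspace).reverse := by
    simp only [PySem.Chars.rstrip]
    rw [← List.reverse_append, List.takeWhile_append_dropWhile, List.reverse_reverse]
  have hw : ∀ c ∈ (v.reverse.takeWhile PySem.Chars.isspace).reverse,
      (c == '_' || PySem.Chars.isspace c) = true := by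
    intro c hc
    rw [List.mem_reverse] at hc
    exact ws_sep (List.mem_takeWhile_imp hc)
  conv_rhs => rw [hv]
  unfold key
  rw [List.takeWhile_append]
  by_cases hlen : ((PySem.Chars.rstrip v).takeWhile Pb).length = (PySem.Chars.rstrip v).length
  · rw [if_pos hlen]
    have hself : (PySem.Chars.rstrip v).takeWhile Pb = PySem.Chars.rstrip v :=
      (List.takeWhile_prefix Pb).eq_of_length hlen
    rw [tok_append_sep _ _ (fun c hc => hw c ((List.takeWhile_sublist _).mem hc)), hself]
  · rw [if_neg hlen]

theorem key_strip (u : List Char) : key (PySem.Chars.strip u) = key u := by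
  simp only [PySem.Chars.strip, PySem.Chars.lstrip]
  rw [key_rstrip, key_lstrip]

-- cutting at one delimiter does not change the pre-delimiter prefix
theorem cut_cut {c : Char} (hc : c ∈ stageDelims) :
    ∀ (t : List Char), (t.takeWhile (fun x => !(c == x))).takeWhile Pb = t.takeWhile Pb := by
  intro t
  induction t with
  | nil => rfl
  | cons x rest ih =>
    by_cases hP : Pb x = true
    · have hx : x ∉ stageDelims := by
        intro hmem
        have := (isIn_singleton_delims x).mpr hmem
        simp [Pb, this] at hP
      have hne : (!(c == x)) = true := by
        simp only [Bool.not_eq_eq_eq_not, Bool.not_true, beq_eq_false_iff_ne]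
        intro h; exact hx (h ▸ hc)
      simp only [List.takeWhile_cons, hne, if_true, hP, ih]
    · by_cases hcx : (c == x) = true
      · simp [hcx, hP]
      · simp [hcx, hP]

theorem key_aStep {c : Char} (hc : c ∈ stageDelims) (t : List Char) :
    key (aStep t [c]) = key t := by
  rw [aStep_eq]
  by_cases hin : PySem.Chars.isIn [c] t = true
  · rw [if_pos hin, key_strip]
    unfold key
    rw [cut_cut hc]
  · rw [if_neg hin]

theorem key_fold (t : List Char) :
    key ([['('], [':'], ['-'], ['|']].foldl aStep t) = key t := by
  simp only [List.foldl_cons, List.foldl_nil]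
  rw [key_aStep (by simp [stageDelims]), key_aStep (by simp [stageDelims]),
      key_aStep (by simp [stageDelims]), key_aStep (by simp [stageDelims])]

-- membership in an aStep output implies membership in its input
theorem mem_strip {x : Char} {l : List Char} (h : x ∈ PySem.Chars.strip l) : x ∈ l := by
  simp only [PySem.Chars.strip, PySem.Chars.rstrip, PySem.Chars.lstrip, List.mem_reverse] at h
  have h1 := (List.dropWhile_sublist _).mem h
  rw [List.mem_reverse] at h1
  exact (List.dropWhile_sublist _).mem h1

theorem aStep_mem {x c : Char} {t : List Char} (h : x ∈ aStep t [c]) : x ∈ t := by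
  rw [aStep_eq] at h
  by_cases hin : PySem.Chars.isIn [c] t = true
  · rw [if_pos hin] at h
    exact (List.takeWhile_sublist _).mem (mem_strip h)
  · rwa [if_neg hin] at h

theorem aStep_kill (c : Char) (t : List Char) : c ∉ aStep t [c] := by
  rw [aStep_eq]
  by_cases hin : PySem.Chars.isIn [c] t = true
  · rw [if_pos hin]
    intro h
    have := List.mem_takeWhile_imp (mem_strip h)
    simp at this
  · rw [if_neg hin]
    intro h
    exact hin ((PySem.Chars.isIn_iff_infix [c] t).mpr ((List.singleton_infix_iff c t).mpr h))

theorem label1_nodelim (t : List Char) :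
    ∀ c ∈ stageDelims, c ∉ [['('], [':'], ['-'], ['|']].foldl aStep t := by
  intro c hc
  simp only [List.foldl_cons, List.foldl_nil]
  simp only [stageDelims, List.mem_cons, List.not_mem_nil, or_false] at hc
  rcases hc with h | h | h | h <;> subst h
  · exact fun hm => aStep_kill '(' _ (aStep_mem (aStep_mem (aStep_mem hm)))
  · exact fun hm => aStep_kill ':' _ (aStep_mem (aStep_mem hm))
  · exact fun hm => aStep_kill '-' _ (aStep_mem hm)
  · exact aStep_kill '|' _

theorem takeWhile_Pb_label1 (t : List Char) :
    ([['('], [':'], ['-'], ['|']].foldl aStep t).takeWhile Pb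
      = [['('], [':'], ['-'], ['|']].foldl aStep t := by
  apply List.takeWhile_eq_self_iff.mpr
  intro x hx
  unfold Pb
  cases hin : PySem.Chars.isIn [x] stageDelims
  · rfl
  · exact absurd hx (label1_nodelim t x ((isIn_singleton_delims x).mp hin))

-- the substitution performed by label.replace("_", " ")
def subst (c : Char) : Char := if c == '_' then ' ' else c

theorem replace_go_eq : ∀ (l : List Char) (fuel : ℕ) (acc : List Char), l.length ≤ fuel →
    PySem.Chars.replace.go ['_'] [' '] fuel l acc = acc.reverse ++ l.map subst := by
  intro l
  induction l with
  | nil =>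
    intro fuel acc _
    match fuel with
    | 0 => simp [PySem.Chars.replace.go]
    | f + 1 => simp [PySem.Chars.replace.go]
  | cons x rest ih =>
    intro fuel acc hfuel
    match fuel with
    | 0 => simp at hfuel
    | f + 1 =>
      simp only [PySem.Chars.replace.go]
      by_cases hxe : x = '_'
      · have hpre : ['_'].isPrefixOf (x :: rest) = true := by simp [List.isPrefixOf, hxe]
        simp only [hpre, if_true, List.length_cons, List.drop_succ_cons, List.length_nil,
          List.drop_zero, List.reverse_cons, List.reverse_nil, List.nil_append,
          List.singleton_append]
        rw [ih f _ (by simpa using Nat.le_of_succ_le_succ hfuel)]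
        have hsub : subst x = ' ' := by simp [subst, hxe]
        simp [hsub]
      · have hpre : ['_'].isPrefixOf (x :: rest) = false := by
          simp [List.isPrefixOf]
          exact fun h => hxe h.symm
        simp only [hpre, Bool.false_eq_true, if_false]
        rw [ih f _ (by simpa using Nat.le_of_succ_le_succ hfuel)]
        have hsub : subst x = x := by simp [subst, hxe]
        simp [hsub]

theorem replace_underscore (t : List Char) :
    PySem.Chars.replace t ['_'] [' '] = t.map subst := by
  simp only [PySem.Chars.replace]
  rw [if_neg (by simp)]
  simpa using replace_go_eq t t.length [] le_rfl

theorem tok_nil (cur : List Char) (acc : List (List Char)) :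
    tok [] cur acc = if cur = [] then acc.reverse else (cur.reverse :: acc).reverse := rfl

theorem tok_cons (c : Char) (rest cur : List Char) (acc : List (List Char)) :
    tok (c :: rest) cur acc =
      if (c == '_' || PySem.Chars.isspace c) = true then
        tok rest [] (if cur = [] then acc else cur.reverse :: acc)
      else tok rest (c :: cur) acc := rfl

theorem go0_nil (cur : List Char) (acc : List (List Char)) :
    PySem.Chars.split₀.go [] cur acc =
      if cur.isEmpty = true then acc.reverse else (cur.reverse :: acc).reverse := rfl

theorem go0_cons (c : Char) (rest cur : List Char) (acc : List (List Char)) :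
    PySem.Chars.split₀.go (c :: rest) cur acc =
      if PySem.Chars.isspace c = true then
        (if cur.isEmpty = true then PySem.Chars.split₀.go rest [] acc
         else PySem.Chars.split₀.go rest [] (cur.reverse :: acc))
      else PySem.Chars.split₀.go rest (c :: cur) acc := rfl

theorem split_map : ∀ (t cur : List Char) (acc : List (List Char)),
    PySem.Chars.split₀.go (t.map subst) cur acc = tok t cur acc := by
  intro t
  induction t with
  | nil =>
    intro cur acc
    by_cases hcur : cur = [] <;> simp [go0_nil, tok_nil, hcur, List.isEmpty_iff]
  | cons c rest ih =>
    intro cur acc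
    rw [List.map_cons, go0_cons, tok_cons]
    by_cases hc : c = '_'
    · subst hc
      rw [show subst '_' = ' ' from rfl]
      rw [if_pos (show PySem.Chars.isspace ' ' = true from by decide),
          if_pos (show ('_' == '_' || PySem.Chars.isspace '_') = true from by decide)]
      by_cases hcur : cur = []
      · rw [if_pos (show cur.isEmpty = true from by simp [hcur]), if_pos hcur, ih]
      · rw [if_neg (show ¬cur.isEmpty = true from by simp [List.isEmpty_iff, hcur]),
            if_neg hcur, ih]
    · have hsub : subst c = c := by simp [subst, hc]
      rw [hsub]
      by_cases hws : PySem.Chars.isspace c = true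
      · rw [if_pos hws,
            if_pos (show (c == '_' || PySem.Chars.isspace c) = true from by simp [hws])]
        by_cases hcur : cur = []
        · rw [if_pos (show cur.isEmpty = true from by simp [hcur]), if_pos hcur, ih]
        · rw [if_neg (show ¬cur.isEmpty = true from by simp [List.isEmpty_iff, hcur]),
              if_neg hcur, ih]
      · rw [if_neg hws,
            if_neg (show ¬(c == '_' || PySem.Chars.isspace c) = true from by simp [hc, hws]), ih]

theorem bGo_eq : ∀ (l cur : List Char) (acc : List (List Char)),
    bGo l cur acc = tok (l.takeWhile Pb) cur acc := by
  intro l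
  induction l with
  | nil => intro cur acc; rfl
  | cons c rest ih =>
    intro cur acc
    by_cases hd : PySem.Chars.isIn [c] stageDelims = true
    · have hP : Pb c = false := by simp [Pb, hd]
      simp only [bGo, hd, if_true, List.takeWhile_cons, hP]
      simp [tok]
    · have hP : Pb c = true := by simp [Pb, hd]
      simp only [bGo, hd, Bool.false_eq_true, if_false, List.takeWhile_cons, hP, if_true, tok]
      by_cases hs : (c == '_' || PySem.Chars.isspace c) = true
      · simp only [hs, if_true, ih]
      · simp only [hs, Bool.false_eq_true, if_false, ih]

theorem tokens_eq (l : List Char) :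
    PySem.Chars.split₀ (PySem.Chars.replace
        ([['('], [':'], ['-'], ['|']].foldl aStep (PySem.Chars.lower (PySem.Chars.strip l)))
        ['_'] [' '])
      = bGo (PySem.Chars.lower (PySem.Chars.strip l)) [] [] := by
  rw [replace_underscore, bGo_eq]
  show PySem.Chars.split₀.go _ [] [] = _
  rw [split_map]
  have h1 := key_fold (PySem.Chars.lower (PySem.Chars.strip l))
  unfold key at h1
  rw [takeWhile_Pb_label1] at h1
  exact h1

-- ===== VERDICT (by name: the statement is the Claim_ definition above) =====
theorem normalize_stage_key_spec : Claim_equal_normalize_stage_key := by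
  intro raw _
  unfold Spec_normalize_stage_key
  rcases raw with _ | s
  · rfl
  · simp only [normalize_stage_key, normalize_stage_key_alt]
    by_cases hs : s = ""
    · rw [if_pos hs, if_pos hs]
    · rw [if_neg hs, if_neg hs]
      exact congrArg
        (fun w => PySem.Dict.get? stageAliases (String.mk (PySem.Chars.join [' '] w)))
        (tokens_eq s.toList)
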